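-- pv_equiv track=rewrite | github.com/parallelno/Vector06c | Vector06c_Dev/_Projects/GameNonane/tests/imgToRle.py | RearrangeBytesToListVlines
-- ===== SOURCE A (Python) =====
-- def RearrangeBytesToListVlines(_bytes, _w, _h):
-- 	listVLines = []
-- 	for x in range(_w // 8):
-- 		vline = []
-- 		for y in range(_h):
-- 			i = y * (_w // 8) + x
-- 			vline.append(_bytes[i])
-- 		listVLines.append(vline)
-- 	return listVLines
-- ===== SOURCE B (Python) =====
-- def RearrangeBytesToListVlines(_bytes, _w, _h):
--     q = _w // 8
--     if q <= 0:
--         return []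
--     rows = [[_bytes[y * q + x] for x in range(q)] for y in range(_h)]
--     return [[row[x] for row in rows] for x in range(q)]
-- ===== Notes on version B (the rewrite author's own statement) =====
-- stated objective: alternative
-- what changed: Instead of extracting each vertical line directly with a nested index loop, B first builds the row-major grid as rows and then transposes it by per-index access in a second pass.
import Mathlib
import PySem

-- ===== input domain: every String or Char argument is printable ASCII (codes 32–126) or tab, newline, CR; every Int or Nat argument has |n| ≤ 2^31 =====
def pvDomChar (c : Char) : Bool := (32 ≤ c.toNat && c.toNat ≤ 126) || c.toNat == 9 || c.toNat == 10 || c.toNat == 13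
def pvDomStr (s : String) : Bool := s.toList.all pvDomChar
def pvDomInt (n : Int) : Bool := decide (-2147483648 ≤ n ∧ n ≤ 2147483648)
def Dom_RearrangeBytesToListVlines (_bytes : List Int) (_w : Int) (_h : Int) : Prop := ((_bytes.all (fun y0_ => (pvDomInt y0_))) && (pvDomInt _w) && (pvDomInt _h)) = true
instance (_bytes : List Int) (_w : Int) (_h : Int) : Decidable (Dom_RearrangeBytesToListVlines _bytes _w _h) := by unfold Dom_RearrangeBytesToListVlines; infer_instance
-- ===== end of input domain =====

-- B replaces A's direct nested column-extraction loop by building the row-major grid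
-- first and then transposing it by per-index access (alternative decomposition; same cost).

-- ===== PORT A =====
def RearrangeBytesToListVlines (_bytes : List Int) (_w : Int) (_h : Int) : List (List Int) :=
  (PySem.List.pyRange 0 (PySem.Int.floordiv _w 8) 1).foldl
    (fun listVLines x =>
      listVLines ++ [(PySem.List.pyRange 0 _h 1).foldl
        (fun vline y =>
          vline ++ [PySem.List.pyGetD _bytes (y * PySem.Int.floordiv _w 8 + x) 0]) []])
    []

-- ===== PORT B =====
def RearrangeBytesToListVlines_alt (_bytes : List Int) (_w : Int) (_h : Int) : List (List Int) :=
  let q := PySem.Int.floordiv _w 8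
  if q ≤ 0 then [] else
  let rows := (PySem.List.pyRange 0 _h 1).map (fun y =>
    (PySem.List.pyRange 0 q 1).map (fun x => PySem.List.pyGetD _bytes (y * q + x) 0))
  (PySem.List.pyRange 0 q 1).map (fun x =>
    rows.map (fun row => PySem.List.pyGetD row x 0))

-- ===== PRECONDITION & SPEC =====
-- Pre_ excludes exactly the inputs on which Python A raises IndexError: when both the
-- column count _w//8 and _h are positive, every accessed index y*(_w//8)+x must be in range,
-- i.e. _h*(_w//8) ≤ len(_bytes).
def Pre_RearrangeBytesToListVlines (_bytes : List Int) (_w : Int) (_h : Int) : Prop :=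
  PySem.Int.floordiv _w 8 ≤ 0 ∨ _h ≤ 0 ∨ _h * PySem.Int.floordiv _w 8 ≤ (_bytes.length : Int)
instance (_bytes : List Int) (_w : Int) (_h : Int) : Decidable (Pre_RearrangeBytesToListVlines _bytes _w _h) := by unfold Pre_RearrangeBytesToListVlines; infer_instance
def pvWitness_RearrangeBytesToListVlines : List Int × Int × Int := ([1, 2, 3, 4, 5, 6], 16, 3)

def Spec_RearrangeBytesToListVlines (_bytes : List Int) (_w : Int) (_h : Int) (out : List (List Int)) : Prop := out = RearrangeBytesToListVlines_alt _bytes _w _h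
instance (_bytes : List Int) (_w : Int) (_h : Int) (out : List (List Int)) : Decidable (Spec_RearrangeBytesToListVlines _bytes _w _h out) := by unfold Spec_RearrangeBytesToListVlines; infer_instance

-- ===== CLAIM (what is proved, stated in full; the proofs are below) =====
def Claim_equal_RearrangeBytesToListVlines : Prop := ∀ (_bytes : List Int) (_w : Int) (_h : Int), Dom_RearrangeBytesToListVlines _bytes _w _h → Pre_RearrangeBytesToListVlines _bytes _w _h → Spec_RearrangeBytesToListVlines _bytes _w _h (RearrangeBytesToListVlines _bytes _w _h)

-- ===== LEMMAS AND PROOFS =====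

-- ===== VERDICT (by name: the statement is the Claim_ definition above) =====
set_option maxHeartbeats 1000000 in
theorem RearrangeBytesToListVlines_spec : Claim_equal_RearrangeBytesToListVlines := by
  intro _bytes _w _h _ _
  unfold Spec_RearrangeBytesToListVlines RearrangeBytesToListVlines RearrangeBytesToListVlines_alt
  by_cases hq : PySem.Int.floordiv _w 8 ≤ 0
  · rw [PySem.List.pyRange_one_eq_nil hq]
    have hq' : _w / 8 ≤ 0 := by
      rwa [PySem.Int.floordiv_eq_ediv_of_pos (by norm_num)] at hq
    simp
    exact fun h => absurd h (by omega)
  simp only [hq, if_false]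
  simp only [PySem.List.foldl_append_singleton_eq_map, List.nil_append, List.map_map]
  refine List.map_congr_left (fun x hx => ?_)
  refine List.map_congr_left (fun y _ => ?_)
  simp only [Function.comp]
  obtain ⟨hx0, hxq⟩ := (PySem.List.mem_pyRange_one).mp hx
  rw [PySem.List.pyGetD_map_pyRange_of_nonneg _ _ _ _ hx0 hxq]
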